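-- pv_equiv track=rewrite | github.com/rapid7/insightconnect-plugins | opendxl/komand_opendxl/connection/connection.py | fix_escaping_issues
-- ===== SOURCE A (Python) =====
-- def fix_escaping_issues(crt: str)-> str:
--     # Fix \n being replaced by \\n
--     if '\\n' in crt:
--         crt = crt.replace('\\n', '\n', -1)
--
--     # Fix \n being replaced by \s
--     certlist = crt.split()
--     newcert = certlist.pop(0)
--     for line in certlist:
--         if line == 'CERTIFICATE-----':
--             newcert = newcert + ' ' + line
--         elif line == 'PRIVATE':
--             newcert = newcert + ' ' + line
--         elif line == 'KEY-----':
--             newcert = newcert + ' ' + line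
--         else:
--             newcert = newcert + '\n' + line
--     newcert = newcert + '\n'
--     return newcert
-- ===== SOURCE B (Python) =====
-- SPECIAL = frozenset(('CERTIFICATE-----', 'PRIVATE', 'KEY-----'))
--
-- def fix_escaping_issues(crt: str) -> str:
--     tokens = crt.replace('\\n', '\n').split()
--     head = tokens[0]
--     # build the tail of the result BACK-TO-FRONT: walk the remaining tokens in
--     # reverse order, prepending each token with its separator onto the suffix
--     suffix = '\n'
--     for t in reversed(tokens[1:]):
--         suffix = (' ' if t in SPECIAL else '\n') + t + suffix
--     return head + suffix
-- ===== Notes on version B (the rewrite author's own statement) =====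
-- stated objective: alternative
-- what changed: B builds the result back-to-front: it walks the tokens after the first in REVERSE order, prepending each token with a membership-chosen separator onto the already-built suffix (ending '\n'), instead of A's left-to-right if/elif chain appending onto a growing accumulator.
-- outside the precondition, e.g. on fix_escaping_issues(''): A raises IndexError, B raises IndexError; on fix_escaping_issues('\\n'): A raises IndexError, B raises IndexError
import Mathlib
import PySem

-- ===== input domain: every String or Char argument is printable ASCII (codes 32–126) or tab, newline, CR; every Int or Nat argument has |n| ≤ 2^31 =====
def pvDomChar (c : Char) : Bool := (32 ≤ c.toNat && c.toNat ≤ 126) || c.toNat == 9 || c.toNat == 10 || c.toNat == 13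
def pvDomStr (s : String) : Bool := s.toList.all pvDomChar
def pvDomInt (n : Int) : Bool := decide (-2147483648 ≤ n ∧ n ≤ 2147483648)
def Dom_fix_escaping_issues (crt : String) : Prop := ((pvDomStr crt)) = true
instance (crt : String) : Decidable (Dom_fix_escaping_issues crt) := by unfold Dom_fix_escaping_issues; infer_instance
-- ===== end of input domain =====

-- B builds the output back-to-front (reverse walk prepending token+separator onto the suffix)
-- instead of A's forward if/elif accumulator; objective: alternative decomposition, not faster.

-- ===== PORT A =====
def fix_escaping_issues (crt : String) : String :=
  -- if '\n' in crt: crt = crt.replace('\\n', '\n', -1)   (count -1 = replace all)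
  let crt := if PySem.Str.isIn "\\n" crt then PySem.Str.replace crt "\\n" "\n" else crt
  let certlist := PySem.Str.split₀ crt
  match certlist with
  | [] => ""  -- Python raises IndexError here (pop from empty list); excluded by Pre_
  | newcert :: certlist =>
    let newcert := certlist.foldl (fun newcert line =>
      if line == "CERTIFICATE-----" then newcert ++ " " ++ line
      else if line == "PRIVATE" then newcert ++ " " ++ line
      else if line == "KEY-----" then newcert ++ " " ++ line
      else newcert ++ "\n" ++ line) newcert
    newcert ++ "\n"

-- ===== PORT B =====
-- t in SPECIAL
def pvSpecialTok (t : String) : Bool :=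
  t == "CERTIFICATE-----" || t == "PRIVATE" || t == "KEY-----"

def fix_escaping_issues_alt (crt : String) : String :=
  let tokens := PySem.Str.split₀ (PySem.Str.replace crt "\\n" "\n")
  match tokens with
  | [] => ""  -- Python raises IndexError here (tokens[0]); excluded by Pre_
  | head :: rest =>
    -- for t in reversed(tokens[1:]): suffix = sep + t + suffix
    let suffix := rest.reverse.foldl
      (fun suffix t => (if pvSpecialTok t then " " else "\n") ++ t ++ suffix) "\n"
    head ++ suffix

-- ===== PRECONDITION & SPEC =====
-- Pre_ excludes exactly the inputs that are empty or whitespace-only after unescaping '\\n'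
-- (no token at all), on which Python A raises IndexError at certlist.pop(0) (and B at tokens[0]).
def Pre_fix_escaping_issues (crt : String) : Prop :=
  PySem.Str.split₀ (PySem.Str.replace crt "\\n" "\n") ≠ []
instance (crt : String) : Decidable (Pre_fix_escaping_issues crt) := by
  unfold Pre_fix_escaping_issues; infer_instance

def pvWitness_fix_escaping_issues : String := "-----BEGIN CERTIFICATE-----\\nabc\\n-----END CERTIFICATE-----"

def Spec_fix_escaping_issues (crt : String) (out : String) : Prop := out = fix_escaping_issues_alt crt
instance (crt : String) (out : String) : Decidable (Spec_fix_escaping_issues crt out) := by unfold Spec_fix_escaping_issues; infer_instance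

-- ===== CLAIM (what is proved, stated in full; the proofs are below) =====
def Claim_equal_fix_escaping_issues : Prop := ∀ (crt : String), Dom_fix_escaping_issues crt → Pre_fix_escaping_issues crt → Spec_fix_escaping_issues crt (fix_escaping_issues crt)

-- ===== LEMMAS AND PROOFS =====

-- replace is the identity when the pattern does not occur (so A's 'if sub in s' guard is redundant)
theorem pvReplaceGo_noop (old new : List Char) :
    ∀ (fuel : Nat) (l acc : List Char), ¬ old <:+: l →
      PySem.Chars.replace.go old new fuel l acc = acc.reverse ++ l := by
  intro fuel
  induction fuel with
  | zero => intro l acc _; rfl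
  | succ n ih =>
    intro l acc h
    cases l with
    | nil => simp [PySem.Chars.replace.go]
    | cons c t =>
      have hpre : old.isPrefixOf (c :: t) = false := by
        by_contra hx
        have : old <+: (c :: t) := List.isPrefixOf_iff_prefix.mp (by
          cases hy : old.isPrefixOf (c :: t) with
          | true => rfl
          | false => exact absurd hy hx)
        exact h this.isInfix
      have ht : ¬ old <:+: t := fun hx => h (hx.trans (List.suffix_cons c t).isInfix)
      simp only [PySem.Chars.replace.go, hpre]
      rw [ih t (c :: acc) ht]
      simp

theorem pvReplace_noop (s old new : List Char) (h : PySem.Chars.isIn old s = false) :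
    PySem.Chars.replace s old new = s := by
  have hinf : ¬ old <:+: s := (PySem.Chars.isIn_eq_false_iff old s).mp h
  have hold : old ≠ [] := by
    intro he; subst he
    simp [PySem.Chars.isIn_nil] at h
  unfold PySem.Chars.replace
  rw [if_neg (by simpa [List.isEmpty_iff] using hold)]
  rw [pvReplaceGo_noop old new s.length s [] hinf]
  rfl

theorem pvStrReplace_noop (s old new : String) (h : PySem.Str.isIn old s = false) :
    PySem.Str.replace s old new = s := by
  apply String.ext
  have := pvReplace_noop s.toList old.toList new.toList (by simpa using h)
  simpa [PySem.Str.toList_replace] using this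

-- forward accumulator (plus trailing '\n') = reverse-walk prepend onto the suffix
theorem pvKey (sep : String → String) :
    ∀ (rest : List String) (acc : String),
      (rest.foldl (fun a t => a ++ sep t ++ t) acc) ++ "\n"
        = acc ++ rest.reverse.foldl (fun s t => sep t ++ t ++ s) "\n" := by
  intro rest
  induction rest with
  | nil => intro acc; simp
  | cons t r ih =>
    intro acc
    simp only [List.foldl_cons, List.reverse_cons, List.foldl_append, List.foldl_cons,
      List.foldl_nil]
    rw [ih (acc ++ sep t ++ t)]
    simp [String.append_assoc]

-- ===== VERDICT (by name: the statement is the Claim_ definition above) =====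
theorem fix_escaping_issues_spec : Claim_equal_fix_escaping_issues := by
  intro crt _ hpre
  unfold Pre_fix_escaping_issues at hpre
  unfold Spec_fix_escaping_issues
  have hrep : (if PySem.Str.isIn "\\n" crt then PySem.Str.replace crt "\\n" "\n" else crt)
      = PySem.Str.replace crt "\\n" "\n" := by
    cases h : PySem.Str.isIn "\\n" crt with
    | true => rfl
    | false => simp [pvStrReplace_noop crt "\\n" "\n" h]
  cases hsp : PySem.Str.split₀ (PySem.Str.replace crt "\\n" "\n") with
  | nil => exact absurd hsp hpre
  | cons t0 rest =>
    simp only [fix_escaping_issues, fix_escaping_issues_alt, hrep, hsp]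
    rw [← pvKey (fun t => if pvSpecialTok t then " " else "\n") rest t0]
    congr 1
    apply List.foldl_ext
    intro acc t _
    by_cases h1 : t = "CERTIFICATE-----" <;> by_cases h2 : t = "PRIVATE" <;>
      by_cases h3 : t = "KEY-----" <;> simp [h1, h2, h3, pvSpecialTok]
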